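-- pv_equiv track=rewrite | github.com/yutaweb/Atcoder | Beginner/Beginner Contest 208/B-Factorial-Yen-Coin.py | detect_factorial
-- ===== SOURCE A (Python) =====
-- import math
--
-- def detect_factorial(num):
--     i = 1
--     while True:
--         temp = math.factorial(i)
--         if i > 10:
--             temp = math.factorial(10)
--             break
--         if temp > num:
--             temp = math.factorial(i - 1)
--             break
--         if temp == num:
--             break
--         i = i + 1
--
--     return temp
-- ===== SOURCE B (Python) =====
-- import math
--
-- def detect_factorial(num):
--     # Binary search in the strictly increasing table [1!, 2!, ..., 10!]
--     # for the number of entries <= num; answer is the last such entry,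
--     # or 1 (= 0! = 1!) when even 1! exceeds num.
--     facts = [math.factorial(k) for k in range(1, 11)]
--     lo, hi = 0, len(facts)
--     while lo < hi:
--         mid = (lo + hi) // 2
--         if facts[mid] <= num:
--             lo = mid + 1
--         else:
--             hi = mid
--     return facts[lo - 1] if lo > 0 else 1
-- ===== Notes on version B (the rewrite author's own statement) =====
-- stated objective: alternative
-- what changed: Replaces A's incremental factorial loop with three early-break branches by a hand-written binary search over the precomputed strictly increasing table [1!..10!] that finds the count of entries <= num and returns the last such entry (1 when none).
import Mathlib
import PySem

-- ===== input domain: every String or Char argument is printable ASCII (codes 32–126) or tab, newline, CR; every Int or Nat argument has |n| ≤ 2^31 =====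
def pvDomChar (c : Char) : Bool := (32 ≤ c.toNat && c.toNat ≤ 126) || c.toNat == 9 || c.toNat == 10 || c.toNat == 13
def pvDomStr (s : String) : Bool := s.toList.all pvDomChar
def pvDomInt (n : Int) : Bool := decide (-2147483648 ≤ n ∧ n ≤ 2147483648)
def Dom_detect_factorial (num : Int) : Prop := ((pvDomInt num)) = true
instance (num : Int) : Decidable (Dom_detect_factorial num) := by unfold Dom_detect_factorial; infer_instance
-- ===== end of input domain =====

-- B replaces A's incremental factorial loop with early breaks by a hand-written
-- binary search over the strictly increasing table [1!, ..., 10!] (objective: alternative).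

-- ===== PORT A =====
-- math.factorial(i); the argument is always ≥ 0 here, where toNat is exact
def pyFactorial (i : Int) : Int := (Nat.factorial i.toNat : Int)

-- the `while True` loop of A; terminates because i grows and the `i > 10` branch breaks
def loopA (num i : Int) : Int :=
  let temp := pyFactorial i
  if _h1 : i > 10 then pyFactorial 10
  else if temp > num then pyFactorial (i - 1)
  else if temp = num then temp
  else loopA num (i + 1)
termination_by (11 - i).toNat
decreasing_by omega

def detect_factorial (num : Int) : Int := loopA num 1

-- ===== PORT B =====
-- facts[mid] in Source B: mid is always in range there, so pyGet? is some; getD 0 is never the default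
def loopB (num : Int) (facts : List Int) (lo hi : Int) : Int :=
  if _h : lo < hi then
    let mid := PySem.Int.floordiv (lo + hi) 2
    if (PySem.List.pyGet? facts mid).getD 0 ≤ num then loopB num facts (mid + 1) hi
    else loopB num facts lo mid
  else lo
termination_by (hi - lo).toNat
decreasing_by
  all_goals simp only [PySem.Int.floordiv_eq_ediv_of_pos (by norm_num : (0:Int) < 2)] at *
  all_goals omega

def detect_factorial_alt (num : Int) : Int :=
  let facts := (PySem.List.pyRange 1 11 1).map (fun k => (Nat.factorial k.toNat : Int))
  let lo := loopB num facts 0 (facts.length : Int)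
  if lo > 0 then (PySem.List.pyGet? facts (lo - 1)).getD 0 else 1

-- ===== PRECONDITION & SPEC =====
def Spec_detect_factorial (num : Int) (out : Int) : Prop := out = detect_factorial_alt num
instance (num : Int) (out : Int) : Decidable (Spec_detect_factorial num out) := by unfold Spec_detect_factorial; infer_instance

-- ===== CLAIM (what is proved, stated in full; the proofs are below) =====
def Claim_equal_detect_factorial : Prop := ∀ (num : Int), Dom_detect_factorial num → Spec_detect_factorial num (detect_factorial num)

-- ===== LEMMAS AND PROOFS =====

-- the closed form both ports reach: the largest of 0!..10! that is ≤ num (1 when num < 1)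
def table (num : Int) : Int := (if num < 1 then 1 else (if num < 2 then 1 else (if num < 6 then 2 else (if num < 24 then 6 else (if num < 120 then 24 else (if num < 720 then 120 else (if num < 5040 then 720 else (if num < 40320 then 5040 else (if num < 362880 then 40320 else (if num < 3628800 then 362880 else 3628800))))))))))

set_option maxHeartbeats 1000000 in
lemma l11 (num : Int) : loopA num 11 = 3628800 := by
  rw [loopA]; norm_num; decide

set_option maxHeartbeats 2000000 in
lemma l10 (num : Int) : loopA num 10 = (if num < 3628800 then 362880 else 3628800) := by
  rw [loopA]; norm_num [l11, show pyFactorial 10 = 3628800 from by decide, show pyFactorial 9 = 362880 from by decide]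

set_option maxHeartbeats 2000000 in
lemma l9 (num : Int) : loopA num 9 = (if num < 362880 then 40320 else (if num < 3628800 then 362880 else 3628800)) := by
  rw [loopA]; norm_num [l10, show pyFactorial 9 = 362880 from by decide, show pyFactorial 8 = 40320 from by decide]
  all_goals split_ifs <;> omega

set_option maxHeartbeats 2000000 in
lemma l8 (num : Int) : loopA num 8 = (if num < 40320 then 5040 else (if num < 362880 then 40320 else (if num < 3628800 then 362880 else 3628800))) := by
  rw [loopA]; norm_num [l9, show pyFactorial 8 = 40320 from by decide, show pyFactorial 7 = 5040 from by decide]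
  all_goals split_ifs <;> omega

set_option maxHeartbeats 2000000 in
lemma l7 (num : Int) : loopA num 7 = (if num < 5040 then 720 else (if num < 40320 then 5040 else (if num < 362880 then 40320 else (if num < 3628800 then 362880 else 3628800)))) := by
  rw [loopA]; norm_num [l8, show pyFactorial 7 = 5040 from by decide, show pyFactorial 6 = 720 from by decide]
  all_goals split_ifs <;> omega

set_option maxHeartbeats 2000000 in
lemma l6 (num : Int) : loopA num 6 = (if num < 720 then 120 else (if num < 5040 then 720 else (if num < 40320 then 5040 else (if num < 362880 then 40320 else (if num < 3628800 then 362880 else 3628800))))) := by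
  rw [loopA]; norm_num [l7, show pyFactorial 6 = 720 from by decide, show pyFactorial 5 = 120 from by decide]
  all_goals split_ifs <;> omega

set_option maxHeartbeats 2000000 in
lemma l5 (num : Int) : loopA num 5 = (if num < 120 then 24 else (if num < 720 then 120 else (if num < 5040 then 720 else (if num < 40320 then 5040 else (if num < 362880 then 40320 else (if num < 3628800 then 362880 else 3628800)))))) := by
  rw [loopA]; norm_num [l6, show pyFactorial 5 = 120 from by decide, show pyFactorial 4 = 24 from by decide]
  all_goals split_ifs <;> omega

set_option maxHeartbeats 2000000 in
lemma l4 (num : Int) : loopA num 4 = (if num < 24 then 6 else (if num < 120 then 24 else (if num < 720 then 120 else (if num < 5040 then 720 else (if num < 40320 then 5040 else (if num < 362880 then 40320 else (if num < 3628800 then 362880 else 3628800))))))) := by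
  rw [loopA]; norm_num [l5, show pyFactorial 4 = 24 from by decide, show pyFactorial 3 = 6 from by decide]
  all_goals split_ifs <;> omega

set_option maxHeartbeats 2000000 in
lemma l3 (num : Int) : loopA num 3 = (if num < 6 then 2 else (if num < 24 then 6 else (if num < 120 then 24 else (if num < 720 then 120 else (if num < 5040 then 720 else (if num < 40320 then 5040 else (if num < 362880 then 40320 else (if num < 3628800 then 362880 else 3628800)))))))) := by
  rw [loopA]; norm_num [l4, show pyFactorial 3 = 6 from by decide, show pyFactorial 2 = 2 from by decide]
  all_goals split_ifs <;> omega

set_option maxHeartbeats 2000000 in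
lemma l2 (num : Int) : loopA num 2 = (if num < 2 then 1 else (if num < 6 then 2 else (if num < 24 then 6 else (if num < 120 then 24 else (if num < 720 then 120 else (if num < 5040 then 720 else (if num < 40320 then 5040 else (if num < 362880 then 40320 else (if num < 3628800 then 362880 else 3628800))))))))) := by
  rw [loopA]; norm_num [l3, show pyFactorial 2 = 2 from by decide, show pyFactorial 1 = 1 from by decide]
  all_goals split_ifs <;> omega

set_option maxHeartbeats 2000000 in
lemma l1 (num : Int) : loopA num 1 = (if num < 1 then 1 else (if num < 2 then 1 else (if num < 6 then 2 else (if num < 24 then 6 else (if num < 120 then 24 else (if num < 720 then 120 else (if num < 5040 then 720 else (if num < 40320 then 5040 else (if num < 362880 then 40320 else (if num < 3628800 then 362880 else 3628800)))))))))) := by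
  rw [loopA]; norm_num [l2, show pyFactorial 1 = 1 from by decide, show pyFactorial 0 = 1 from by decide]
  all_goals split_ifs <;> omega

lemma A_eq_table (num : Int) : detect_factorial num = table num := by
  unfold detect_factorial table; exact l1 num

set_option maxHeartbeats 2000000 in
lemma B_eq_table (num : Int) : detect_factorial_alt num = table num := by
  have hf : (PySem.List.pyRange 1 11 1).map (fun k => (Nat.factorial k.toNat : Int)) = [1, 2, 6, 24, 120, 720, 5040, 40320, 362880, 3628800] := by decide
  unfold detect_factorial_alt table
  rw [hf]
  by_cases h0 : num < 1
  · simp [loopB, PySem.Int.floordiv, PySem.List.pyGet?, PySem.List.pyIdx?, show ¬((720:Int) ≤ num) from by omega, show ¬((6:Int) ≤ num) from by omega, show ¬((2:Int) ≤ num) from by omega, show ¬((1:Int) ≤ num) from by omega, show num < 1 from by omega]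
  by_cases h1 : num < 2
  · simp [loopB, PySem.Int.floordiv, PySem.List.pyGet?, PySem.List.pyIdx?, show ¬((720:Int) ≤ num) from by omega, show ¬((6:Int) ≤ num) from by omega, show ¬((2:Int) ≤ num) from by omega, show ((1:Int) ≤ num) from by omega, show ¬(num < 1) from by omega, show num < 2 from by omega]
  by_cases h2 : num < 6
  · simp [loopB, PySem.Int.floordiv, PySem.List.pyGet?, PySem.List.pyIdx?, show ¬((720:Int) ≤ num) from by omega, show ¬((6:Int) ≤ num) from by omega, show ((2:Int) ≤ num) from by omega, show ¬(num < 1) from by omega, show ¬(num < 2) from by omega, show num < 6 from by omega]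
  by_cases h3 : num < 24
  · simp [loopB, PySem.Int.floordiv, PySem.List.pyGet?, PySem.List.pyIdx?, show ¬((720:Int) ≤ num) from by omega, show ((6:Int) ≤ num) from by omega, show ¬((120:Int) ≤ num) from by omega, show ¬((24:Int) ≤ num) from by omega, show ¬(num < 1) from by omega, show ¬(num < 2) from by omega, show ¬(num < 6) from by omega, show num < 24 from by omega]
  by_cases h4 : num < 120
  · simp [loopB, PySem.Int.floordiv, PySem.List.pyGet?, PySem.List.pyIdx?, show ¬((720:Int) ≤ num) from by omega, show ((6:Int) ≤ num) from by omega, show ¬((120:Int) ≤ num) from by omega, show ((24:Int) ≤ num) from by omega, show ¬(num < 1) from by omega, show ¬(num < 2) from by omega, show ¬(num < 6) from by omega, show ¬(num < 24) from by omega, show num < 120 from by omega]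
  by_cases h5 : num < 720
  · simp [loopB, PySem.Int.floordiv, PySem.List.pyGet?, PySem.List.pyIdx?, show ¬((720:Int) ≤ num) from by omega, show ((6:Int) ≤ num) from by omega, show ((120:Int) ≤ num) from by omega, show ¬(num < 1) from by omega, show ¬(num < 2) from by omega, show ¬(num < 6) from by omega, show ¬(num < 24) from by omega, show ¬(num < 120) from by omega, show num < 720 from by omega]
  by_cases h6 : num < 5040
  · simp [loopB, PySem.Int.floordiv, PySem.List.pyGet?, PySem.List.pyIdx?, show ((720:Int) ≤ num) from by omega, show ¬((362880:Int) ≤ num) from by omega, show ¬((40320:Int) ≤ num) from by omega, show ¬((5040:Int) ≤ num) from by omega, show ¬(num < 1) from by omega, show ¬(num < 2) from by omega, show ¬(num < 6) from by omega, show ¬(num < 24) from by omega, show ¬(num < 120) from by omega, show ¬(num < 720) from by omega, show num < 5040 from by omega]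
  by_cases h7 : num < 40320
  · simp [loopB, PySem.Int.floordiv, PySem.List.pyGet?, PySem.List.pyIdx?, show ((720:Int) ≤ num) from by omega, show ¬((362880:Int) ≤ num) from by omega, show ¬((40320:Int) ≤ num) from by omega, show ((5040:Int) ≤ num) from by omega, show ¬(num < 1) from by omega, show ¬(num < 2) from by omega, show ¬(num < 6) from by omega, show ¬(num < 24) from by omega, show ¬(num < 120) from by omega, show ¬(num < 720) from by omega, show ¬(num < 5040) from by omega, show num < 40320 from by omega]
  by_cases h8 : num < 362880
  · simp [loopB, PySem.Int.floordiv, PySem.List.pyGet?, PySem.List.pyIdx?, show ((720:Int) ≤ num) from by omega, show ¬((362880:Int) ≤ num) from by omega, show ((40320:Int) ≤ num) from by omega, show ¬(num < 1) from by omega, show ¬(num < 2) from by omega, show ¬(num < 6) from by omega, show ¬(num < 24) from by omega, show ¬(num < 120) from by omega, show ¬(num < 720) from by omega, show ¬(num < 5040) from by omega, show ¬(num < 40320) from by omega, show num < 362880 from by omega]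
  by_cases h9 : num < 3628800
  · simp [loopB, PySem.Int.floordiv, PySem.List.pyGet?, PySem.List.pyIdx?, show ((720:Int) ≤ num) from by omega, show ((362880:Int) ≤ num) from by omega, show ¬((3628800:Int) ≤ num) from by omega, show ¬(num < 1) from by omega, show ¬(num < 2) from by omega, show ¬(num < 6) from by omega, show ¬(num < 24) from by omega, show ¬(num < 120) from by omega, show ¬(num < 720) from by omega, show ¬(num < 5040) from by omega, show ¬(num < 40320) from by omega, show ¬(num < 362880) from by omega, show num < 3628800 from by omega]
  simp [loopB, PySem.Int.floordiv, PySem.List.pyGet?, PySem.List.pyIdx?, show ((720:Int) ≤ num) from by omega, show ((362880:Int) ≤ num) from by omega, show ((3628800:Int) ≤ num) from by omega, show ¬(num < 1) from by omega, show ¬(num < 2) from by omega, show ¬(num < 6) from by omega, show ¬(num < 24) from by omega, show ¬(num < 120) from by omega, show ¬(num < 720) from by omega, show ¬(num < 5040) from by omega, show ¬(num < 40320) from by omega, show ¬(num < 362880) from by omega, show ¬(num < 3628800) from by omega]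

-- ===== VERDICT (by name: the statement is the Claim_ definition above) =====
theorem detect_factorial_spec : Claim_equal_detect_factorial := by
  intro num _
  unfold Spec_detect_factorial
  rw [A_eq_table, B_eq_table]
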